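-- pv_equiv track=rewrite | github.com/M2883b0/daily_task_assistant | daily_task_assistant.py | _draft_collect_closed_math_ranges
-- ===== SOURCE A (Python) =====
-- def _draft_collect_closed_math_ranges(lines: list[str]) -> list[tuple[int, int]]:
--     ranges: list[tuple[int, int]] = []
--     start: int | None = None
--     for i, line in enumerate(lines, start=1):
--         if line.strip() != "$$":
--             continue
--         if start is None:
--             start = i
--         else:
--             ranges.append((start, i))
--             start = None
--     return ranges
-- ===== SOURCE B (Python) =====
-- def _draft_collect_closed_math_ranges(lines: list[str]) -> list[tuple[int, int]]:
--     positions = [i for i, line in enumerate(lines, start=1) if line.strip() == "$$"]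
--     return list(zip(positions[0::2], positions[1::2]))
-- ===== Notes on version B (the rewrite author's own statement) =====
-- stated objective: simpler
-- what changed: Replaces A's running start/None toggle state with a two-phase pass: first materialize the list of 1-based '$$' line indices, then pair consecutive indices by zipping the even- and odd-position slices.
import Mathlib
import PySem

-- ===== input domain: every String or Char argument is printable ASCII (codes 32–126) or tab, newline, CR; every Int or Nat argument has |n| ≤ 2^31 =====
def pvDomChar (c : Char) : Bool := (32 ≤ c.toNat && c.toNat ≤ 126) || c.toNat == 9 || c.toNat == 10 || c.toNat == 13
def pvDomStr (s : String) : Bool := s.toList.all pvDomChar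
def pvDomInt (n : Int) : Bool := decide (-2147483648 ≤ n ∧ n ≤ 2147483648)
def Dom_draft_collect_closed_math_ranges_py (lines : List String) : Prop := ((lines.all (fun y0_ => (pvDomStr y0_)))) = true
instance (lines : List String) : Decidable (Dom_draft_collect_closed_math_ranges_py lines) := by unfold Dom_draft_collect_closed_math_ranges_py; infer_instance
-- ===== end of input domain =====

-- B: two-phase rewrite — collect the 1-based indices of '$$' lines, then pair consecutive
-- indices by zipping the even/odd slices; same result as A's start/None toggle, simpler.
-- ===== PORT A =====
-- A's loop body (the start/None toggle), kept as a named helper for the fold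
def pvStepA (st : List (Int × Int) × Option Int) (p : Int × String) : List (Int × Int) × Option Int :=
  if PySem.Str.strip p.2 ≠ "$$" then st
  else match st.2 with
    | none => (st.1, some p.1)
    | some s => (st.1 ++ [(s, p.1)], none)

def draft_collect_closed_math_ranges_py (lines : List String) : List (Int × Int) :=
  ((PySem.List.enumerate lines 1).foldl pvStepA ([], none)).1

-- ===== PORT B =====
-- B is two-phase: collect the 1-based indices of '$$' lines, then zip the even/odd slices.
def draft_collect_closed_math_ranges_py_alt (lines : List String) : List (Int × Int) :=
  let positions : List Int :=
    (PySem.List.enumerate lines 1).filterMap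
      (fun p => if PySem.Str.strip p.2 = "$$" then some p.1 else none)
  ((PySem.List.slice? positions none none 2).getD []).zip
    ((PySem.List.slice? positions (some 1) none 2).getD [])

-- ===== PRECONDITION & SPEC =====
def Spec_draft_collect_closed_math_ranges_py (lines : List String) (out : List (Int × Int)) : Prop := out = draft_collect_closed_math_ranges_py_alt lines
instance (lines : List String) (out : List (Int × Int)) : Decidable (Spec_draft_collect_closed_math_ranges_py lines out) := by unfold Spec_draft_collect_closed_math_ranges_py; infer_instance

-- ===== CLAIM (what is proved, stated in full; the proofs are below) =====
def Claim_equal_draft_collect_closed_math_ranges_py : Prop := ∀ (lines : List String), Dom_draft_collect_closed_math_ranges_py lines → Spec_draft_collect_closed_math_ranges_py lines (draft_collect_closed_math_ranges_py lines)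

-- ===== LEMMAS AND PROOFS =====

-- pair consecutive elements, dropping an unpaired last one
def pvPairUp : List Int → List (Int × Int)
  | a :: b :: t => (a, b) :: pvPairUp t
  | _ => []

-- A's loop state read as "optional pending start + remaining positions"
def pvPairFrom : Option Int → List Int → List (Int × Int)
  | none, ps => pvPairUp ps
  | some _, [] => []
  | some s, p :: rest => (s, p) :: pvPairUp rest

theorem pvPairFrom_some (s : Int) (ps : List Int) :
    pvPairFrom (some s) ps = pvPairUp (s :: ps) := by
  cases ps <;> rfl

theorem pvSliceEvens_nil : PySem.List.slice? ([] : List Int) none none 2 = some [] := by decide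

theorem pvSliceEvens_one (a : Int) :
    PySem.List.slice? [a] none none 2 = some [a] := by
  simp only [PySem.List.slice?, PySem.List.sliceIndices]
  norm_num
  simp

theorem pvSliceEvens_cons₂ (a b : Int) (t : List Int) :
    PySem.List.slice? (a :: b :: t) none none 2
      = some (a :: (PySem.List.slice? t none none 2).getD []) := by
  simp only [PySem.List.slice?, PySem.List.sliceIndices]
  norm_num
  have h1 : (if 0 ≤ (t.length:Int) + 1 then (((t.length:Int) + 1 + 1 + 2 - 1) / 2).toNat else 0)
      = (((t.length:Int) + 1) / 2).toNat + 1 := by split <;> omega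
  have h2 : (if 0 < t.length then (((t.length:Int) + 2 - 1) / 2).toNat else 0)
      = (((t.length:Int) + 1) / 2).toNat := by split <;> omega
  rw [h1, h2, List.range_succ_eq_map, List.filterMap_cons, List.filterMap_map]
  simp only [Nat.cast_zero, mul_zero, Int.toNat_zero, List.getElem?_cons_zero, Function.comp_def]
  congr 1

theorem pvSliceOdds_nil : PySem.List.slice? ([] : List Int) (some 1) none 2 = some [] := by decide

theorem pvSliceOdds_one (a : Int) :
    PySem.List.slice? [a] (some 1) none 2 = some [] := by
  simp only [PySem.List.slice?, PySem.List.sliceIndices]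
  norm_num

theorem pvSliceOdds_cons₂ (a b : Int) (t : List Int) :
    PySem.List.slice? (a :: b :: t) (some 1) none 2
      = some (b :: (PySem.List.slice? t (some 1) none 2).getD []) := by
  cases t with
  | nil =>
    simp only [PySem.List.slice?, PySem.List.sliceIndices]
    norm_num
    simp
  | cons c t' =>
    simp only [PySem.List.slice?, PySem.List.sliceIndices]
    norm_num
    have hm : min 1 ((t'.length:Int) + 1 + 1 + 1) = 1 := by omega
    rw [hm]
    have h1 : (if 0 ≤ (t'.length:Int) + 1 then (((t'.length:Int) + 1 + 1 + 1 - 1 + 2 - 1) / 2).toNat else 0)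
        = (((t'.length:Int) + 1) / 2).toNat + 1 := by split <;> omega
    have h2 : (if 0 < t'.length then (((t'.length:Int) + 2 - 1) / 2).toNat else 0)
        = (((t'.length:Int) + 1) / 2).toNat := by split <;> omega
    rw [h1, h2, List.range_succ_eq_map, List.filterMap_cons, List.filterMap_map]
    norm_num
    congr 1

-- zipping the even/odd slices is exactly consecutive pairing
theorem pvZipSlices : ∀ (xs : List Int),
    ((PySem.List.slice? xs none none 2).getD []).zip
      ((PySem.List.slice? xs (some 1) none 2).getD []) = pvPairUp xs
  | [] => by rw [pvSliceEvens_nil, pvSliceOdds_nil]; rfl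
  | [a] => by rw [pvSliceEvens_one, pvSliceOdds_one]; rfl
  | a :: b :: t => by
    rw [pvSliceEvens_cons₂, pvSliceOdds_cons₂]
    simp only [Option.getD_some, List.zip_cons_cons, pvPairUp]
    rw [pvZipSlices t]

-- loop invariant for A's fold
theorem pvFoldInv (lines : List String) (i : Int) (acc : List (Int × Int)) (st : Option Int) :
    ((PySem.List.enumerate lines i).foldl pvStepA (acc, st)).1
      = acc ++ pvPairFrom st
          ((PySem.List.enumerate lines i).filterMap
            (fun p => if PySem.Str.strip p.2 = "$$" then some p.1 else none)) := by
  induction lines generalizing i acc st with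
  | nil => cases st <;> simp [PySem.List.enumerate_nil, pvPairFrom, pvPairUp]
  | cons l t ih =>
    rw [PySem.List.enumerate_cons, List.foldl_cons, List.filterMap_cons]
    by_cases h : PySem.Str.strip l = "$$"
    · cases st with
      | none =>
        rw [show pvStepA (acc, none) (i, l) = (acc, some i) from by simp [pvStepA, h]]
        rw [ih]
        simp only [h, if_pos]
        rw [pvPairFrom_some]
        rfl
      | some s =>
        rw [show pvStepA (acc, some s) (i, l) = (acc ++ [(s, i)], none) from by simp [pvStepA, h]]
        rw [ih]
        simp [h, pvPairFrom]
    · rw [show pvStepA (acc, st) (i, l) = (acc, st) from by simp [pvStepA, h]]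
      rw [ih]
      simp [h]

-- ===== VERDICT (by name: the statement is the Claim_ definition above) =====
theorem draft_collect_closed_math_ranges_py_spec : Claim_equal_draft_collect_closed_math_ranges_py := by
  intro lines _
  unfold Spec_draft_collect_closed_math_ranges_py
  unfold draft_collect_closed_math_ranges_py draft_collect_closed_math_ranges_py_alt
  rw [pvFoldInv, pvZipSlices]
  rfl
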